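-- pv_equiv track=rewrite | github.com/Robertbeano/Pillow3f | Pillow3f/Pillow3f/Renderer.py | intrange
-- ===== SOURCE A (Python) =====
-- def intrange(one, two):
--     temp = list()
--     if one==two:
--         return [one,]
--     else:
--         h=0
--         for h in range(abs(one-two)+1):
--             if two<one:
--                 temp.append(one-h)
--             if two>one:
--                 temp.append(one+h)
--     return temp
-- ===== SOURCE B (Python) =====
-- def intrange(one, two):
--     step = 1 if two >= one else -1
--     out = []
--     cur = two
--     while cur != one:
--         out.append(cur)
--         cur -= step
--     out.append(one)
--     out.reverse()
--     return out
-- ===== Notes on version B (the rewrite author's own statement) =====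
-- stated objective: alternative
-- what changed: Builds the output back-to-front: a while loop walks from two toward one collecting values in reverse, then appends one and reverses the list, instead of a forward indexed for-loop with two per-iteration direction branches.
import Mathlib
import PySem

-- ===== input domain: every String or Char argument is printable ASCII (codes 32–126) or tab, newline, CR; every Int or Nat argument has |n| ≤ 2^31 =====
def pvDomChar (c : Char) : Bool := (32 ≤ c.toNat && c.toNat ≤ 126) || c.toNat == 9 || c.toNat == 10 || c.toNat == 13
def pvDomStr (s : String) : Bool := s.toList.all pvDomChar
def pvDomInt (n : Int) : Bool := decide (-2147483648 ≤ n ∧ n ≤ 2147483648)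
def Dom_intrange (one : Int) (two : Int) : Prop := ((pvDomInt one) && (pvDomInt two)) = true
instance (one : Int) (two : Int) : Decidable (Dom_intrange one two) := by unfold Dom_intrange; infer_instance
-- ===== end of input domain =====

-- B builds the output back-to-front: a while loop walks from two toward one, then appends one and reverses (alternative decomposition, same cost).
-- ===== PORT A =====
def intrange (one : Int) (two : Int) : List Int :=
  if one == two then [one]
  else
    (PySem.List.pyRange 0 (((one - two).natAbs : Int) + 1) 1).foldl
      (fun temp h =>
        let temp := if two < one then temp ++ [one - h] else temp
        if two > one then temp ++ [one + h] else temp) []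

-- ===== PORT B =====
-- the while loop 'while cur != one: out.append(cur); cur -= step'; the fuel |two-one|+1 exactly
-- covers its iterations and only makes the recursion total
def intrangeWhile (one : Int) (step : Int) : Nat → Int → List Int → List Int
  | 0, _, acc => acc
  | f + 1, cur, acc =>
      if cur == one then acc
      else intrangeWhile one step f (cur - step) (acc ++ [cur])

def intrange_alt (one : Int) (two : Int) : List Int :=
  let step : Int := if two ≥ one then 1 else -1
  ((intrangeWhile one step ((two - one).natAbs + 1) two []) ++ [one]).reverse

-- ===== PRECONDITION & SPEC =====
def Spec_intrange (one : Int) (two : Int) (out : List Int) : Prop := out = intrange_alt one two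
instance (one : Int) (two : Int) (out : List Int) : Decidable (Spec_intrange one two out) := by unfold Spec_intrange; infer_instance

-- ===== CLAIM (what is proved, stated in full; the proofs are below) =====
def Claim_equal_intrange : Prop := ∀ (one : Int) (two : Int), Dom_intrange one two → Spec_intrange one two (intrange one two)

-- ===== LEMMAS AND PROOFS =====

-- ===== VERDICT (by name: the statement is the Claim_ definition above) =====
theorem foldl_append_map (l : List Int) (f : Int → Int) (init : List Int) :
    l.foldl (fun acc h => acc ++ [f h]) init = init ++ l.map f := by
  induction l generalizing init with
  | nil => simp
  | cons x xs ih => simp [List.foldl, ih]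

theorem whileB_eq (one step : Int) (hs : step = 1 ∨ step = -1) :
    ∀ (n : Nat) (acc : List Int),
      intrangeWhile one step (n + 1) (one + n * step) acc
        = acc ++ (List.range n).map (fun k : Nat => one + ((n : Int) - (k : Int)) * step) := by
  intro n
  induction n with
  | zero => intro acc; simp [intrangeWhile]
  | succ m ih =>
      intro acc
      have hne : ¬ (one + ((m : Int) + 1) * step = one) := by
        rcases hs with h | h <;> rw [h] <;> intro hc <;> omega
      have harg : one + ((m : Nat) + 1 : Nat) * step - step = one + (m : Int) * step := by
        push_cast; ring
      rw [intrangeWhile, if_neg (by simpa using hne), harg, ih]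
      rw [List.range_succ_eq_map, List.map_cons, List.map_map]
      simp only [List.append_assoc, List.singleton_append]
      congr 1
      rw [List.cons.injEq]
      refine ⟨by push_cast; ring, ?_⟩
      apply List.map_congr_left
      intro k _
      simp only [Function.comp]
      push_cast; ring

theorem rev_lemma (one step : Int) (n : Nat) :
    (((List.range n).map (fun k : Nat => one + ((n : Int) - (k : Int)) * step)) ++ [one]).reverse
      = (List.range (n + 1)).map (fun k : Nat => one + (k : Int) * step) := by
  have h1 : ((List.range n).map (fun k : Nat => one + ((n : Int) - (k : Int)) * step)) ++ [one]
      = (List.range (n + 1)).map (fun k : Nat => one + ((n : Int) - (k : Int)) * step) := by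
    rw [List.range_succ, List.map_append]
    simp
  rw [h1]
  apply List.ext_getElem
  · simp
  · intro i h1' h2'
    simp only [List.length_reverse, List.length_map, List.length_range] at h1'
    rw [List.getElem_reverse, List.getElem_map, List.getElem_range,
        List.getElem_map, List.getElem_range]
    simp only [List.length_map, List.length_range]
    have hle : i ≤ n := by omega
    have hc : ((n + 1 - 1 - i : Nat) : Int) = (n : Int) - i := by omega
    rw [hc]
    ring

theorem intrange_spec : Claim_equal_intrange := by
  intro one two _
  unfold Spec_intrange
  rcases lt_trichotomy one two with h | h | h
  · -- ascending
    set n : Nat := (two - one).toNat with hn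
    have htwo : two = one + (n : Int) * 1 := by omega
    have hA : intrange one two = (List.range (n + 1)).map (fun k : Nat => one + (k : Int) * 1) := by
      unfold intrange
      have h1 : ¬ two < one := by omega
      simp only [if_neg h1, if_pos h, beq_iff_eq, if_neg (by omega : ¬ one = two)]
      rw [foldl_append_map, PySem.List.pyRange_one]
      simp only [List.nil_append, List.map_map]
      have hm : (((one - two).natAbs : Int) + 1 - 0).toNat = n + 1 := by omega
      rw [hm]
      apply List.map_congr_left
      intro k _
      simp only [Function.comp]
      ring
    have hB : intrange_alt one two = (List.range (n + 1)).map (fun k : Nat => one + (k : Int) * 1) := by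
      unfold intrange_alt
      have hstep : (if two ≥ one then (1 : Int) else -1) = 1 := if_pos (le_of_lt h)
      have hfuel : (two - one).natAbs + 1 = n + 1 := by omega
      simp only [hstep, hfuel]
      rw [htwo, whileB_eq one 1 (Or.inl rfl) n [], List.nil_append, rev_lemma]
    rw [hA, hB]
  · -- equal
    subst h
    simp [intrange, intrange_alt, intrangeWhile]
  · -- descending
    set n : Nat := (one - two).toNat with hn
    have htwo : two = one + (n : Int) * (-1) := by omega
    have hA : intrange one two = (List.range (n + 1)).map (fun k : Nat => one + (k : Int) * (-1)) := by
      unfold intrange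
      have h2 : ¬ two > one := by omega
      simp only [if_pos h, if_neg h2, beq_iff_eq, if_neg (by omega : ¬ one = two)]
      rw [foldl_append_map, PySem.List.pyRange_one]
      simp only [List.nil_append, List.map_map]
      have hm : (((one - two).natAbs : Int) + 1 - 0).toNat = n + 1 := by omega
      rw [hm]
      apply List.map_congr_left
      intro k _
      simp only [Function.comp]
      ring
    have hB : intrange_alt one two = (List.range (n + 1)).map (fun k : Nat => one + (k : Int) * (-1)) := by
      unfold intrange_alt
      have hstep : (if two ≥ one then (1 : Int) else -1) = -1 := if_neg (by omega)
      have hfuel : (two - one).natAbs + 1 = n + 1 := by omega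
      simp only [hstep, hfuel]
      rw [htwo, whileB_eq one (-1) (Or.inr rfl) n [], List.nil_append, rev_lemma]
    rw [hA, hB]
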